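-- pv_equiv track=rewrite | github.com/keaganchern/LLMtenspiler | polybench_transpilation/dsl_operators.py | matrix_elemwise_div
-- ===== SOURCE A (Python) =====
-- from typing import List, Any
--
-- def matrix_elemwise_div(
--     matrix_x: List[List[int]], matrix_y: List[List[int]]
-- ) -> List[List[int]]:
--     return (
--         []
--         if len(matrix_x) < 1 or not len(matrix_x) == len(matrix_y)
--         else [
--             vec_elemwise_div(matrix_x[0], matrix_y[0]),
--             *matrix_elemwise_div(matrix_x[1:], matrix_y[1:]),
--         ]
--     )
--
-- def vec_elemwise_div(x: List[int], y: List[int]) -> List[int]: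
--     return (
--         []
--         if len(x) < 1 or not len(x) == len(y)
--         else [(x[0] // y[0]), *vec_elemwise_div(x[1:], y[1:])]
--     )
-- ===== SOURCE B (Python) =====
-- def matrix_elemwise_div(matrix_x, matrix_y):
--     if len(matrix_x) < 1 or len(matrix_x) != len(matrix_y):
--         return []
--     out = []
--     for row_x, row_y in zip(matrix_x, matrix_y):
--         if len(row_x) < 1 or len(row_x) != len(row_y):
--             out.append([])
--         else:
--             out.append([a // b for a, b in zip(row_x, row_y)])
--     return out
-- ===== Notes on version B (the rewrite author's own statement) =====
-- stated objective: simpler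
-- what changed: Replaces two levels of list-slicing recursion with a single guarded zip loop building the rows iteratively (inner rows by a comprehension over zip).
import Mathlib
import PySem

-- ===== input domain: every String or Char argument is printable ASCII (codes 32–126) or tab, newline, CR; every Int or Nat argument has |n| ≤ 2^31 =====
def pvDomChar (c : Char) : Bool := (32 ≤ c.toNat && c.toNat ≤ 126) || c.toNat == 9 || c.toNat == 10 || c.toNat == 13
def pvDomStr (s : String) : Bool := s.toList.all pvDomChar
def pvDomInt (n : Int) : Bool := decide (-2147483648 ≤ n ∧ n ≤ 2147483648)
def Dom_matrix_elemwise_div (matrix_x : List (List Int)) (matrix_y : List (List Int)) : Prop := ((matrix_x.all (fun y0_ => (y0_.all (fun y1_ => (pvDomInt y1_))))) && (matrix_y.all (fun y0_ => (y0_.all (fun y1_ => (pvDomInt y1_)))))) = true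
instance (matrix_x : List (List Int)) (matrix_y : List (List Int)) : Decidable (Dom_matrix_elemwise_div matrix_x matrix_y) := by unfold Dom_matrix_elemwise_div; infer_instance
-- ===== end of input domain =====

-- B replaces A's two levels of list-slicing recursion with one guarded loop over zipped rows; objective: simpler.

-- ===== PORT A =====
def vec_elemwise_div (x : List Int) (y : List Int) : List Int :=
  if x.length < 1 ∨ ¬ x.length = y.length then []
  else match x, y with
    | a :: xs, b :: ys => PySem.Int.floordiv a b :: vec_elemwise_div xs ys
    | _, _ => []  -- unreachable under the guard (x nonempty and same length as y)

def matrix_elemwise_div (matrix_x : List (List Int)) (matrix_y : List (List Int)) : List (List Int) :=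
  if matrix_x.length < 1 ∨ ¬ matrix_x.length = matrix_y.length then []
  else match matrix_x, matrix_y with
    | rx :: xs, ry :: ys => vec_elemwise_div rx ry :: matrix_elemwise_div xs ys
    | _, _ => []  -- unreachable under the guard

-- ===== PORT B =====
def matrix_elemwise_div_alt (matrix_x : List (List Int)) (matrix_y : List (List Int)) : List (List Int) :=
  if matrix_x.length < 1 ∨ matrix_x.length ≠ matrix_y.length then []
  else (List.zip matrix_x matrix_y).foldl
    (fun out p =>
      out ++ [if p.1.length < 1 ∨ p.1.length ≠ p.2.length then []
              else (List.zip p.1 p.2).map (fun q => PySem.Int.floordiv q.1 q.2)])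
    []

-- ===== PRECONDITION & SPEC =====
-- Pre_ excludes exactly the inputs where Python raises ZeroDivisionError: a reached
-- (equal outer lengths) row pair of equal lengths whose divisor row contains 0.
def Pre_matrix_elemwise_div (matrix_x : List (List Int)) (matrix_y : List (List Int)) : Prop :=
  matrix_x.length = matrix_y.length →
    ∀ p ∈ List.zip matrix_x matrix_y, p.1.length = p.2.length → (0 : Int) ∉ p.2
instance (matrix_x : List (List Int)) (matrix_y : List (List Int)) : Decidable (Pre_matrix_elemwise_div matrix_x matrix_y) := by unfold Pre_matrix_elemwise_div; infer_instance

def pvWitness_matrix_elemwise_div : List (List Int) × List (List Int) := ([[4, -7], [9]], [[2, 3], [-2]])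

def Spec_matrix_elemwise_div (matrix_x : List (List Int)) (matrix_y : List (List Int)) (out : List (List Int)) : Prop := out = matrix_elemwise_div_alt matrix_x matrix_y
instance (matrix_x : List (List Int)) (matrix_y : List (List Int)) (out : List (List Int)) : Decidable (Spec_matrix_elemwise_div matrix_x matrix_y out) := by unfold Spec_matrix_elemwise_div; infer_instance

-- ===== CLAIM (what is proved, stated in full; the proofs are below) =====
def Claim_equal_matrix_elemwise_div : Prop := ∀ (matrix_x : List (List Int)) (matrix_y : List (List Int)), Dom_matrix_elemwise_div matrix_x matrix_y → Pre_matrix_elemwise_div matrix_x matrix_y → Spec_matrix_elemwise_div matrix_x matrix_y (matrix_elemwise_div matrix_x matrix_y)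

-- ===== LEMMAS AND PROOFS =====
def pvRow (p : List Int × List Int) : List Int :=
  if p.1.length < 1 ∨ p.1.length ≠ p.2.length then []
  else (List.zip p.1 p.2).map (fun q => PySem.Int.floordiv q.1 q.2)

theorem pv_foldl_map (l : List (List Int × List Int)) (acc : List (List Int)) :
    l.foldl (fun out p => out ++ [pvRow p]) acc = acc ++ l.map pvRow := by
  induction l generalizing acc with
  | nil => simp
  | cons h t ih => simp [List.foldl, ih]

theorem pv_vec_eq (x y : List Int) (h : x.length = y.length) :
    vec_elemwise_div x y = (List.zip x y).map (fun q => PySem.Int.floordiv q.1 q.2) := by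
  induction x generalizing y with
  | nil => rw [vec_elemwise_div.eq_def]; simp
  | cons a xs ih =>
    cases y with
    | nil => simp at h
    | cons b ys =>
      have h' : xs.length = ys.length := by simpa using h
      rw [vec_elemwise_div.eq_def, if_neg (by simp [h])]
      simp [ih ys h']

theorem pvRow_eq (x y : List Int) (h : x.length = y.length) :
    pvRow (x, y) = (List.zip x y).map (fun q => PySem.Int.floordiv q.1 q.2) := by
  unfold pvRow
  by_cases hx : x.length < 1
  · have hx0 : x = [] := List.eq_nil_of_length_eq_zero (by omega)
    subst hx0
    simp
  · rw [if_neg (by rw [not_or]; exact ⟨hx, by simp [h]⟩)]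

theorem pv_main (mx my : List (List Int)) (h : mx.length = my.length) :
    matrix_elemwise_div mx my = (List.zip mx my).map pvRow := by
  induction mx generalizing my with
  | nil => rw [matrix_elemwise_div.eq_def]; simp
  | cons rx xs ih =>
    cases my with
    | nil => simp at h
    | cons ry ys =>
      have h' : xs.length = ys.length := by simpa using h
      rw [matrix_elemwise_div.eq_def, if_neg (by simp [h])]
      have hrow : vec_elemwise_div rx ry = pvRow (rx, ry) := by
        by_cases hl : rx.length = ry.length
        · rw [pv_vec_eq rx ry hl, pvRow_eq rx ry hl]
        · rw [vec_elemwise_div.eq_def, if_pos (Or.inr hl)]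
          rw [pvRow, if_pos (Or.inr hl)]
      simp [ih ys h', hrow]

-- ===== VERDICT (by name: the statement is the Claim_ definition above) =====
theorem matrix_elemwise_div_spec : Claim_equal_matrix_elemwise_div := by
  intro mx my _ _
  unfold Spec_matrix_elemwise_div matrix_elemwise_div_alt
  by_cases hg : mx.length < 1 ∨ mx.length ≠ my.length
  · rw [if_pos hg, matrix_elemwise_div.eq_def, if_pos (by tauto)]
  · rw [if_neg hg]
    have hlen : mx.length = my.length := by tauto
    show matrix_elemwise_div mx my = (List.zip mx my).foldl (fun out p => out ++ [pvRow p]) []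
    rw [pv_foldl_map, pv_main mx my hlen]
    simp
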